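-- pv_equiv track=rewrite | github.com/Fondamenti18/fondamenti-di-programmazione | students/1753608/homework01/program03.py | clear_string
-- ===== SOURCE A (Python) =====
-- def clear_string(s):
--     temp = ""
--
--     for c in s:
--         if (c >= 'a' and c <= 'z'): temp += c
--
--     for c in set(temp):
--         last = temp.rindex(c)
--         temp = temp[:last].replace(c, "") + temp[last:]
--     return(temp)
-- ===== SOURCE B (Python) =====
-- def clear_string(s):
--     seen = set()
--     out = []
--     for c in reversed(s):
--         if c >= 'a' and c <= 'z' and c not in seen:
--             seen.add(c)
--             out.append(c)
--     out.reverse()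
--     return "".join(out)
-- ===== Notes on version B (the rewrite author's own statement) =====
-- stated objective: faster
-- what changed: B makes one reverse pass with a seen-set (keep the first occurrence seen from the right, then reverse), instead of A's filter pass followed by an rindex+replace rescan of the string for every distinct lowercase character.
import Mathlib
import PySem

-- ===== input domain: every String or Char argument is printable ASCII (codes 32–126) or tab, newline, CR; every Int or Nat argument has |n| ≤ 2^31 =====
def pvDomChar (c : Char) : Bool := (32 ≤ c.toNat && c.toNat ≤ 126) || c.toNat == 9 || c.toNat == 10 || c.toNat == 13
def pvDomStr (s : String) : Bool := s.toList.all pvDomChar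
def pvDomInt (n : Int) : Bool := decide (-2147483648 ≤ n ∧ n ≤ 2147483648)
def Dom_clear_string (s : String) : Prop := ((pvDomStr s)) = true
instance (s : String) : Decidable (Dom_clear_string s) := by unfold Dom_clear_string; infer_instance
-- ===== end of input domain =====

-- B is a single reverse pass with a seen-set instead of A's per-distinct-char rindex/replace rescans (objective: simpler).

-- ===== PORT A =====
-- str.rindex(c) for a single char: index of the LAST occurrence. Exact when c ∈ t; in A, c is
-- always drawn from set(temp) so Python's ValueError branch is unreachable.
def pyRindex (t : List Char) (c : Char) : Nat :=
  t.length - 1 - List.findIdx (fun x => x == c) t.reverse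

-- the body of A's second loop: temp = temp[:last].replace(c, "") + temp[last:]
def stepA (t : List Char) (c : Char) : List Char :=
  PySem.Chars.replace (PySem.List.slice t none (some (pyRindex t c : Int))) [c] []
    ++ PySem.List.slice t (some (pyRindex t c : Int)) none

-- A's second loop: for c in set(temp): …
def loopA (temp : List Char) : List Char := (PySem.Set.ofList temp).foldl stepA temp

def clear_string (s : String) : String :=
  String.ofList (loopA
    (s.toList.foldl (fun t c => if decide ('a' ≤ c) && decide (c ≤ 'z') then t ++ [c] else t) []))

-- ===== PORT B =====
def stepB (st : PySem.Set Char × List Char) (c : Char) : PySem.Set Char × List Char :=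
  if (decide ('a' ≤ c) && decide (c ≤ 'z')) && !PySem.Set.contains st.1 c then
    (PySem.Set.add st.1 c, st.2 ++ [c])
  else st

def clear_string_alt (s : String) : String :=
  String.ofList (s.toList.reverse.foldl stepB (PySem.Set.empty, [])).2.reverse

-- ===== PRECONDITION & SPEC =====
def Spec_clear_string (s : String) (out : String) : Prop := out = clear_string_alt s
instance (s : String) (out : String) : Decidable (Spec_clear_string s out) := by unfold Spec_clear_string; infer_instance

-- ===== CLAIM (what is proved, stated in full; the proofs are below) =====
def Claim_equal_clear_string : Prop := ∀ (s : String), Dom_clear_string s → Spec_clear_string s (clear_string s)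

-- ===== LEMMAS AND PROOFS =====

-- canonical value both programs compute: the last occurrence of each lowercase char, in order
def keepLast (l : List Char) : List Char := (PySem.Set.ofList l.reverse).reverse

-- replace(c, "") with a one-char pattern is a filter
theorem replace_go_filter (c : Char) : ∀ (fuel : Nat) (l acc : List Char), l.length ≤ fuel →
    PySem.Chars.replace.go [c] [] fuel l acc = acc.reverse ++ l.filter (fun x => x != c) := by
  intro fuel
  induction fuel with
  | zero => intro l acc h; cases l <;> simp_all [PySem.Chars.replace.go]
  | succ n ih =>
    intro l acc h
    cases l with
    | nil => simp [PySem.Chars.replace.go]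
    | cons x t =>
      by_cases hx : x = c
      · subst hx
        simp [PySem.Chars.replace.go, List.isPrefixOf,
          ih t acc (by simpa using h)]
      · simp [PySem.Chars.replace.go, List.isPrefixOf, hx, Ne.symm hx,
          ih t (x :: acc) (by simpa using Nat.le_of_succ_le_succ h)]

theorem replace_filter (l : List Char) (c : Char) :
    PySem.Chars.replace l [c] [] = l.filter (fun x => x != c) := by
  simpa using replace_go_filter c l.length l [] le_rfl

theorem findIdx_first (c : Char) (a b : List Char) (ha : c ∉ a) :
    List.findIdx (fun x => x == c) (a ++ c :: b) = a.length := by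
  induction a with
  | nil => simp [List.findIdx_cons]
  | cons x t ih =>
    simp only [List.mem_cons, not_or] at ha
    have hxc : (x == c) = false := beq_eq_false_iff_ne.mpr (fun h => ha.1 h.symm)
    simp [List.findIdx_cons, hxc, ih ha.2]

theorem exists_first_split (c : Char) (r : List Char) (h : c ∈ r) :
    ∃ a b, r = a ++ c :: b ∧ c ∉ a := by
  induction r with
  | nil => cases h
  | cons x t ih =>
    by_cases hx : x = c
    · exact ⟨[], t, by simp [hx], by simp⟩
    · have hct : c ∈ t := by
        rcases List.mem_cons.1 h with h1 | h1
        · exact absurd h1.symm hx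
        · exact h1
      rcases ih hct with ⟨a, b, rfl, hna⟩
      exact ⟨x :: a, b, rfl, by simp [hna, Ne.symm hx]⟩

-- the reverse-world reading of stepA at the first-occurrence split of t.reverse
theorem stepA_eq (t a b : List Char) (c : Char) (ht : t.reverse = a ++ c :: b) (ha : c ∉ a) :
    stepA t c = (b.filter (fun x => x != c)).reverse ++ c :: a.reverse := by
  have htt : t = b.reverse ++ c :: a.reverse := by
    have := congrArg List.reverse ht
    simpa using this
  have hlen : t.length = b.length + 1 + a.length := by simp [htt]; omega
  have hidx : pyRindex t c = b.length := by
    unfold pyRindex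
    rw [ht, findIdx_first c a b ha, hlen]
    omega
  unfold stepA
  rw [hidx, PySem.List.slice_to_natCast, PySem.List.slice_from_natCast, replace_filter]
  rw [htt]
  have h1 : List.take b.length (b.reverse ++ c :: a.reverse) = b.reverse := by
    simp
  have h2 : List.drop b.length (b.reverse ++ c :: a.reverse) = c :: a.reverse := by
    simp
  rw [h1, h2, List.filter_reverse]

-- folding Set.add ignores occurrences of an element already in the set
theorem foldl_add_filter (c : Char) : ∀ (b u : List Char), c ∈ u →
    (b.filter (fun x => x != c)).foldl PySem.Set.add u = b.foldl PySem.Set.add u := by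
  intro b
  induction b with
  | nil => intro u _; rfl
  | cons x t ih =>
    intro u hu
    by_cases hx : x = c
    · subst hx
      have hadd : PySem.Set.add u x = u := PySem.Set.add_of_mem hu
      simp [hadd, ih u hu]
    · have hmem : c ∈ PySem.Set.add u x := (PySem.Set.mem_add u x c).2 (Or.inl hu)
      have hne : (x != c) = true := bne_iff_ne.2 hx
      simp [hne, ih _ hmem]

theorem ofList_filter_seen (c : Char) (a b : List Char) :
    PySem.Set.ofList (a ++ c :: b.filter (fun x => x != c)) = PySem.Set.ofList (a ++ c :: b) := by
  have h1 : a ++ c :: b = (a ++ [c]) ++ b := by simp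
  have h2 : a ++ c :: b.filter (fun x => x != c) = (a ++ [c]) ++ b.filter (fun x => x != c) := by simp
  have key : ∀ l : List Char, List.foldl PySem.Set.add [] ((a ++ [c]) ++ l)
      = List.foldl PySem.Set.add (List.foldl PySem.Set.add [] (a ++ [c])) l :=
    fun l => List.foldl_append
  rw [h1, h2, PySem.Set.ofList_eq_foldl, PySem.Set.ofList_eq_foldl, key, key]
  have hc : c ∈ List.foldl PySem.Set.add [] (a ++ [c]) := by
    rw [← PySem.Set.ofList_eq_foldl]
    exact (PySem.Set.mem_ofList _ _).2 (by simp)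
  exact foldl_add_filter c b _ hc

theorem keepLast_stepA (t a b : List Char) (c : Char) (ht : t.reverse = a ++ c :: b) (ha : c ∉ a) :
    keepLast (stepA t c) = keepLast t := by
  unfold keepLast
  rw [stepA_eq t a b c ht ha, ht]
  have : ((b.filter (fun x => x != c)).reverse ++ c :: a.reverse).reverse
      = a ++ c :: b.filter (fun x => x != c) := by simp
  rw [this, ofList_filter_seen]

theorem foldA (cs : List Char) : ∀ (t : List Char), cs.Nodup →
    (∀ c ∈ cs, c ∈ t) → (∀ x, 2 ≤ t.count x → x ∈ cs) →
    cs.foldl stepA t = keepLast t := by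
  induction cs with
  | nil =>
    intro t _ _ hcnt
    have hnd : t.Nodup := List.nodup_iff_count_le_one.2 (fun x => by
      by_contra h
      exact absurd (hcnt x (by omega)) (List.not_mem_nil))
    unfold keepLast
    rw [PySem.Set.ofList_eq_self_of_nodup _ (by simpa using hnd)]
    simp
  | cons c cs' ih =>
    intro t hnd hmem hcnt
    have hct : c ∈ t.reverse := by simpa using hmem c (by simp)
    rcases exists_first_split c t.reverse hct with ⟨a, b, ht, ha⟩
    have htt : t = b.reverse ++ c :: a.reverse := by
      have := congrArg List.reverse ht
      simpa using this
    have hstep := stepA_eq t a b c ht ha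
    have hnd' : cs'.Nodup := (List.nodup_cons.1 hnd).2
    have hcnot : c ∉ cs' := (List.nodup_cons.1 hnd).1
    simp only [List.foldl_cons]
    rw [ih (stepA t c) hnd'
      (by
        intro d hd
        have hdne : d ≠ c := fun h => hcnot (h ▸ hd)
        have hdt : d ∈ t := hmem d (List.mem_cons_of_mem _ hd)
        rw [hstep]
        rw [htt] at hdt
        simp only [List.mem_append, List.mem_reverse, List.mem_cons] at hdt ⊢
        rcases hdt with h | h | h
        · exact Or.inl (List.mem_filter.2 ⟨h, bne_iff_ne.2 hdne⟩)
        · exact absurd h hdne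
        · exact Or.inr (Or.inr h))
      (by
        intro x hx2
        have hxc : x ≠ c := by
          intro h
          have h1 : (stepA t c).count c = 1 := by
            rw [hstep]
            have hca : c ∉ a.reverse := by simpa using ha
            have hcf : List.count c (List.filter (fun x => x != c) b) = 0 :=
              List.count_eq_zero.2 (by simp [List.mem_filter])
            simp [List.count_append, hcf, List.count_eq_zero.2 hca]
          rw [h] at hx2
          omega
        have hxt : 2 ≤ t.count x := by
          rw [hstep] at hx2
          rw [htt]
          simp only [List.count_append, List.count_reverse, List.count_cons] at hx2 ⊢
          have : (b.filter (fun y => y != c)).count x = b.count x := by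
            rw [List.count_filter]
            simp [bne_iff_ne.2 hxc]
          omega
        rcases List.mem_cons.1 (hcnt x hxt) with h | h
        · exact absurd h hxc
        · exact h)]
    exact keepLast_stepA t a b c ht ha

theorem foldB (xs : List Char) : ∀ (u : List Char),
    xs.foldl stepB (u, u) =
      ((xs.filter (fun c => decide ('a' ≤ c) && decide (c ≤ 'z'))).foldl PySem.Set.add u,
       (xs.filter (fun c => decide ('a' ≤ c) && decide (c ≤ 'z'))).foldl PySem.Set.add u) := by
  induction xs with
  | nil => intro u; rfl
  | cons x t ih =>
    intro u
    by_cases hlc : (decide ('a' ≤ x) && decide (x ≤ 'z')) = true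
    · by_cases hc : PySem.Set.contains u x = true
      · have hm : x ∈ u := (PySem.Set.contains_iff u x).1 hc
        have hadd : PySem.Set.add u x = u := PySem.Set.add_of_mem hm
        simp [stepB, hlc, hm, ih]
      · have hm : x ∉ u := fun h => hc ((PySem.Set.contains_iff u x).2 h)
        have hadd : PySem.Set.add u x = u ++ [x] := PySem.Set.add_of_not_mem hm
        simp [stepB, hlc, hm, ih]
    · simp [stepB, hlc, ih]

-- ===== VERDICT (by name: the statement is the Claim_ definition above) =====
theorem clear_string_spec : Claim_equal_clear_string := by
  intro s _
  unfold Spec_clear_string clear_string clear_string_alt loopA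
  set lc : Char → Bool := fun c => decide ('a' ≤ c) && decide (c ≤ 'z') with hlc
  have hfa : s.toList.foldl (fun t c => if lc c then t ++ [c] else t) [] = s.toList.filter lc := by
    have h := PySem.List.foldl_append_if (p := lc) (f := (id : Char → Char)) (l := s.toList) (acc := [])
    simpa using h
  rw [hfa]
  set temp := s.toList.filter lc with htemp
  have hA : (PySem.Set.ofList temp).foldl stepA temp = keepLast temp := by
    apply foldA
    · exact PySem.Set.nodup_ofList temp
    · exact fun c hc => (PySem.Set.mem_ofList _ _).1 hc
    · intro x hx
      exact (PySem.Set.mem_ofList _ _).2 (List.count_pos_iff.1 (by omega))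
  have hB : (s.toList.reverse.foldl stepB (PySem.Set.empty, [])).2.reverse = keepLast temp := by
    have : (PySem.Set.empty : PySem.Set Char) = ([] : List Char) := rfl
    rw [this, foldB s.toList.reverse []]
    unfold keepLast
    rw [List.filter_reverse, ← PySem.Set.ofList_eq_foldl, htemp]
  rw [hA, hB]
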